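-- pv_equiv track=rewrite | github.com/Madhivarman/DataStructures | leetcodeProblems/zoho_q2.py | replaceGreaterNumber
-- ===== SOURCE A (Python) =====
-- def replaceGreaterNumber(nums):
--     result = [-1] * len(nums)
--     idx = 0
--
--     while(idx < len(nums)-1):
--         to_traverse = nums[idx+1:]
--         all_greater = []
--         for t in to_traverse:
--             if nums[idx] < t:
--                 all_greater.append(t)
--
--         result[idx] = min(all_greater) if len(all_greater) != 0 else -1
--         idx += 1 #update
--
--     return result
-- ===== SOURCE B (Python) =====
-- def replaceGreaterNumber(nums):
--     # One right-to-left pass, keeping already-seen elements in a sorted list;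
--     # the answer for x is the successor of x found by binary search.
--     seen = []   # ascending
--     out = []
--     for x in reversed(nums):
--         lo, hi = 0, len(seen)
--         while lo < hi:
--             mid = (lo + hi) // 2
--             if seen[mid] <= x:
--                 lo = mid + 1
--             else:
--                 hi = mid
--         out.append(seen[lo] if lo < len(seen) else -1)
--         seen.insert(lo, x)
--     out.reverse()
--     return out
-- ===== Notes on version B (the rewrite author's own statement) =====
-- stated objective: faster
-- what changed: Replaced the per-index rescan of the whole right suffix (slice + filter + min) by a single right-to-left pass that maintains the seen suffix as a sorted list and answers each query with a binary-search successor lookup.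
import Mathlib
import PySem

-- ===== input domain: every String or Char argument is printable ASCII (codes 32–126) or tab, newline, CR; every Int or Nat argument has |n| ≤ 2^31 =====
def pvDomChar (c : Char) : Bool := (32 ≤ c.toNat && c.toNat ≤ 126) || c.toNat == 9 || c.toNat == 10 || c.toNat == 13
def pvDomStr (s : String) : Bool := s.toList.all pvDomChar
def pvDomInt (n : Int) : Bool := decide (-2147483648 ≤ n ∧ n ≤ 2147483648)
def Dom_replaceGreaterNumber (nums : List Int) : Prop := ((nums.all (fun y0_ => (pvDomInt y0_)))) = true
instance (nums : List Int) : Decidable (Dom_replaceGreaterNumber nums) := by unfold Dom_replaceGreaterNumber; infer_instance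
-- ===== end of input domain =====

-- B replaces A's per-index rescan of the right suffix by one right-to-left pass over a
-- sorted list with binary-search successor queries (objective: faster).

-- ===== PORT A =====
-- while idx < len(nums)-1: slice the suffix, collect the greater elements, set result[idx]
def rgnLoopA (nums : List Int) (result : List Int) (idx : Nat) : List Int :=
  if _h : idx < nums.length - 1 then
    let to_traverse := PySem.List.slice nums (some ((idx : Int) + 1)) none
    let all_greater := to_traverse.foldl
      (fun acc t => if PySem.List.pyGetD nums (idx : Int) 0 < t then acc ++ [t] else acc) []
    -- min(all_greater) is guarded by the nonemptiness test, so .getD is never the default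
    let v := if all_greater.length ≠ 0 then
        (PySem.List.min? all_greater (fun y => y)).getD (-1) else -1
    rgnLoopA nums (PySem.List.pySetD result (idx : Int) v) (idx + 1)
  else result
termination_by nums.length - 1 - idx
decreasing_by omega

def replaceGreaterNumber (nums : List Int) : List Int :=
  rgnLoopA nums (List.replicate nums.length (-1)) 0

-- ===== PORT B =====
-- while lo < hi: mid = (lo+hi)//2; if seen[mid] <= x: lo = mid+1 else: hi = mid
def rgnBisect (seen : List Int) (x : Int) (lo hi : Nat) : Nat :=
  if _h : lo < hi then
    let mid := (lo + hi) / 2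
    if PySem.List.pyGetD seen (mid : Int) 0 ≤ x then rgnBisect seen x (mid + 1) hi
    else rgnBisect seen x lo mid
  else lo
termination_by hi - lo
decreasing_by all_goals omega

-- body of the 'for x in reversed(nums)' loop, state = (seen, out)
def rgnStep (st : List Int × List Int) (x : Int) : List Int × List Int :=
  let lo := rgnBisect st.1 x 0 st.1.length
  let out := st.2 ++ [if lo < st.1.length then PySem.List.pyGetD st.1 (lo : Int) 0 else -1]
  let seen := PySem.List.insert st.1 (lo : Int) x
  (seen, out)

def replaceGreaterNumber_alt (nums : List Int) : List Int :=
  ((nums.reverse).foldl rgnStep ([], [])).2.reverse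

-- ===== PRECONDITION & SPEC =====
def Spec_replaceGreaterNumber (nums : List Int) (out : List Int) : Prop := out = replaceGreaterNumber_alt nums
instance (nums : List Int) (out : List Int) : Decidable (Spec_replaceGreaterNumber nums out) := by unfold Spec_replaceGreaterNumber; infer_instance

-- ===== CLAIM (what is proved, stated in full; the proofs are below) =====
def Claim_equal_replaceGreaterNumber : Prop := ∀ (nums : List Int), Dom_replaceGreaterNumber nums → Spec_replaceGreaterNumber nums (replaceGreaterNumber nums)

-- ===== LEMMAS AND PROOFS =====

-- the common specification: result[i] = min of the elements after i that are greater, else -1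
def rgnMinGT (x : Int) (l : List Int) : Int :=
  match PySem.List.min? (l.filter (fun t => decide (x < t))) (fun y => y) with
  | some m => m
  | none => -1

def rgnSpec : List Int → List Int
  | [] => []
  | x :: xs => rgnMinGT x xs :: rgnSpec xs

-- number of elements ≤ x in l (the bisect_right position in a sorted list)
def rgnP (l : List Int) (x : Int) : Nat := (l.takeWhile (fun s => decide (s ≤ x))).length

lemma rgnP_le (l : List Int) (x : Int) : rgnP l x ≤ l.length :=
  (List.takeWhile_sublist _).length_le

lemma rgnP_cons_pos {a x : Int} (t : List Int) (ha : a ≤ x) :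
    rgnP (a :: t) x = rgnP t x + 1 := by
  unfold rgnP
  rw [List.takeWhile_cons_of_pos (by simpa using ha)]
  simp

lemma rgnP_cons_neg {a x : Int} (t : List Int) (ha : ¬ a ≤ x) :
    rgnP (a :: t) x = 0 := by
  unfold rgnP
  rw [List.takeWhile_cons_of_neg (by simpa using ha)]
  rfl

lemma rgnP_low (l : List Int) (x : Int) : ∀ j, j < rgnP l x → l.getD j 0 ≤ x := by
  induction l with
  | nil => intro j hj; simp [rgnP] at hj
  | cons a t ih =>
      intro j hj
      by_cases ha : a ≤ x
      · cases j with
        | zero => simpa using ha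
        | succ j =>
            rw [rgnP_cons_pos t ha] at hj
            simpa using ih j (by omega)
      · rw [rgnP_cons_neg t ha] at hj
        omega

lemma rgnP_high (l : List Int) (x : Int) (hs : l.Pairwise (· ≤ ·)) :
    ∀ j, rgnP l x ≤ j → j < l.length → x < l.getD j 0 := by
  induction l with
  | nil => intro j _ hj; simp at hj
  | cons a t ih =>
      rw [List.pairwise_cons] at hs
      intro j hpj hj
      by_cases ha : a ≤ x
      · rw [rgnP_cons_pos t ha] at hpj
        cases j with
        | zero => omega
        | succ j =>
            simpa using ih hs.2 j (by omega) (by simpa using hj)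
      · push_neg at ha
        cases j with
        | zero => simpa using ha
        | succ j =>
            have hj' : j < t.length := by simpa using hj
            have hmem : t.getD j 0 ∈ t := by
              rw [List.getD_eq_getElem t 0 hj']; exact List.getElem_mem hj'
            have := hs.1 _ hmem
            simp only [List.getD_cons_succ]
            omega

lemma rgnBisect_eq (l : List Int) (x : Int) (p : Nat)
    (hlow : ∀ j, j < p → l.getD j 0 ≤ x)
    (hhigh : ∀ j, p ≤ j → j < l.length → x < l.getD j 0) :
    ∀ lo hi, lo ≤ p → p ≤ hi → hi ≤ l.length → rgnBisect l x lo hi = p := by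
  intro lo hi
  induction hn : hi - lo using Nat.strong_induction_on generalizing lo hi with
  | _ n ih =>
      intro hlo hhi hlen
      rw [rgnBisect]
      split
      · rename_i hlt
        have hmid1 : lo ≤ (lo + hi) / 2 := by omega
        have hmid2 : (lo + hi) / 2 < hi := by omega
        simp only [PySem.List.pyGetD_natCast]
        split
        · rename_i hle
          have hp : (lo + hi) / 2 + 1 ≤ p := by
            by_contra hc
            exact absurd hle (not_le.2 (hhigh _ (by omega) (by omega)))
          exact ih _ (by omega) _ _ rfl hp hhi hlen
        · rename_i hgt
          have hp : p ≤ (lo + hi) / 2 := by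
            by_contra hc
            exact hgt (hlow _ (by omega))
          exact ih _ (by omega) _ _ rfl hlo hp (by omega)
      · omega

lemma foldl_min_eq_left (a : Int) (t : List Int) (h : ∀ y ∈ t, a ≤ y) :
    t.foldl min a = a := by
  induction t with
  | nil => rfl
  | cons b s ih =>
      have hb : a ≤ b := h b (by simp)
      simp only [List.foldl_cons, min_eq_left hb]
      exact ih (fun y hy => h y (by simp [hy]))

-- for a sorted list, the min of the greater elements is the head of the > x tail
lemma rgnMinGT_sorted (x : Int) (l : List Int) (hs : l.Pairwise (· ≤ ·)) :
    rgnMinGT x l = ((l.dropWhile (fun s => decide (s ≤ x))).head?).getD (-1) := by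
  induction l with
  | nil => rfl
  | cons a t ih =>
      rw [List.pairwise_cons] at hs
      by_cases ha : a ≤ x
      · have h1 : (a :: t).filter (fun s => decide (x < s)) = t.filter (fun s => decide (x < s)) :=
          List.filter_cons_of_neg (by simpa using not_lt.2 ha)
        have h2 : (a :: t).dropWhile (fun s => decide (s ≤ x)) = t.dropWhile (fun s => decide (s ≤ x)) :=
          List.dropWhile_cons_of_pos (by simpa using ha)
        rw [h2, show rgnMinGT x (a :: t) = rgnMinGT x t from by unfold rgnMinGT; rw [h1]]
        exact ih hs.2
      · push_neg at ha
        have h1 : (a :: t).filter (fun s => decide (x < s)) = a :: t.filter (fun s => decide (x < s)) :=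
          List.filter_cons_of_pos (by simpa using ha)
        have h2 : (a :: t).dropWhile (fun s => decide (s ≤ x)) = a :: t :=
          List.dropWhile_cons_of_neg (by simpa using not_le.2 ha)
        unfold rgnMinGT
        rw [h1, h2, PySem.List.min?_id_cons,
          foldl_min_eq_left a _ (fun y hy => hs.1 y (List.mem_of_mem_filter hy))]
        rfl

lemma rgnMinGT_perm (x : Int) {l₁ l₂ : List Int} (h : l₁.Perm l₂) :
    rgnMinGT x l₁ = rgnMinGT x l₂ := by
  have hf : (l₁.filter (fun t => decide (x < t))).Perm (l₂.filter (fun t => decide (x < t))) :=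
    h.filter _
  unfold rgnMinGT
  cases h₁ : PySem.List.min? (l₁.filter (fun t => decide (x < t))) (fun y => y) with
  | none =>
      rw [PySem.List.min?_eq_none_iff _ _] at h₁
      rw [h₁] at hf
      rw [(PySem.List.min?_eq_none_iff _ _).2 hf.symm.eq_nil]
  | some m₁ =>
      cases h₂ : PySem.List.min? (l₂.filter (fun t => decide (x < t))) (fun y => y) with
      | none =>
          rw [PySem.List.min?_eq_none_iff _ _] at h₂
          rw [h₂] at hf
          rw [(PySem.List.min?_eq_none_iff _ _).2 hf.eq_nil] at h₁
          cases h₁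
      | some m₂ =>
          have m1mem := PySem.List.min?_mem h₁
          have m2mem := PySem.List.min?_mem h₂
          have h12 : m₂ ≤ m₁ := PySem.List.min?_isMin h₂ m₁ (hf.mem_iff.1 m1mem)
          have h21 : m₁ ≤ m₂ := PySem.List.min?_isMin h₁ m₂ (hf.mem_iff.2 m2mem)
          simp [le_antisymm h21 h12]

lemma rgn_insert_sorted (x : Int) (l : List Int) (hs : l.Pairwise (· ≤ ·)) :
    (l.takeWhile (fun s => decide (s ≤ x)) ++ x :: l.dropWhile (fun s => decide (s ≤ x))).Pairwise (· ≤ ·) := by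
  induction l with
  | nil => simp
  | cons a t ih =>
      rw [List.pairwise_cons] at hs
      by_cases ha : a ≤ x
      · rw [List.takeWhile_cons_of_pos (by simpa using ha),
          List.dropWhile_cons_of_pos (by simpa using ha), List.cons_append,
          List.pairwise_cons]
        refine ⟨?_, ih hs.2⟩
        intro b hb
        rcases List.mem_append.1 hb with hb | hb
        · exact hs.1 b ((List.takeWhile_sublist _).mem hb)
        · rcases List.mem_cons.1 hb with rfl | hb
          · exact ha
          · exact hs.1 b ((List.dropWhile_sublist _).mem hb)
      · push_neg at ha
        rw [List.takeWhile_cons_of_neg (by simpa using not_le.2 ha),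
          List.dropWhile_cons_of_neg (by simpa using not_le.2 ha), List.nil_append,
          List.pairwise_cons]
        refine ⟨?_, List.pairwise_cons.2 hs⟩
        intro b hb
        rcases List.mem_cons.1 hb with rfl | hb
        · exact le_of_lt ha
        · exact le_trans (le_of_lt ha) (hs.1 b hb)

lemma drop_rgnP (s : List Int) (x : Int) :
    s.drop (rgnP s x) = s.dropWhile (fun v => decide (v ≤ x)) := by
  induction s with
  | nil => rfl
  | cons a t ih =>
      by_cases ha : a ≤ x
      · rw [rgnP_cons_pos t ha, List.drop_succ_cons,
          List.dropWhile_cons_of_pos (by simpa using ha)]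
        exact ih
      · rw [rgnP_cons_neg t ha,
          List.dropWhile_cons_of_neg (by simpa using not_le.2 (by omega : x < a))]
        rfl

-- B's per-element value and new state, in spec terms
def rgnSpecRev (acc : List Int) : List Int → List Int
  | [] => []
  | x :: xs => rgnMinGT x acc :: rgnSpecRev (x :: acc) xs

lemma rgnStep_out (s : List Int) (out : List Int) (x : Int) (hs : s.Pairwise (· ≤ ·)) :
    rgnStep (s, out) x =
      (s.takeWhile (fun v => decide (v ≤ x)) ++ x :: s.dropWhile (fun v => decide (v ≤ x)),
       out ++ [rgnMinGT x s]) := by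
  have hp := rgnP_le s x
  have htake : s.take (rgnP s x) = s.takeWhile (fun v => decide (v ≤ x)) := by
    rw [show rgnP s x = (s.takeWhile (fun v => decide (v ≤ x))).length from rfl]
    exact (List.prefix_iff_eq_take.mp (List.takeWhile_prefix _)).symm
  have hdrop : s.drop (rgnP s x) = s.dropWhile (fun v => decide (v ≤ x)) :=
    drop_rgnP s x
  have hlen2 : (s.dropWhile (fun v => decide (v ≤ x))).length = s.length - rgnP s x := by
    rw [← hdrop, List.length_drop]
  have hb : rgnBisect s x 0 s.length = rgnP s x :=
    rgnBisect_eq s x (rgnP s x) (rgnP_low s x) (rgnP_high s x hs) 0 s.length (Nat.zero_le _) hp le_rfl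
  unfold rgnStep
  simp only [hb, Prod.mk.injEq]
  refine ⟨?_, ?_⟩
  · rw [PySem.List.insert_natCast s _ x hp, htake, hdrop]
  · congr 1
    rw [rgnMinGT_sorted x s hs]
    by_cases hlt : rgnP s x < s.length
    · rw [if_pos hlt, PySem.List.pyGetD_natCast, List.getD_eq_getElem?_getD]
      have hget : s[rgnP s x]? = (s.dropWhile (fun v => decide (v ≤ x))).head? := by
        rw [← hdrop]
        exact List.head?_drop.symm
      rw [hget]
      cases hdw : (s.dropWhile (fun v => decide (v ≤ x))) with
      | nil => rw [hdw] at hlen2; simp at hlen2; omega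
      | cons b bs => rfl
    · rw [if_neg hlt]
      have hdw : (s.dropWhile (fun v => decide (v ≤ x))) = [] :=
        List.length_eq_zero_iff.1 (by omega)
      rw [hdw]
      rfl

lemma rgn_foldB (r : List Int) : ∀ (s acc out : List Int), s.Perm acc → s.Pairwise (· ≤ ·) →
    (r.foldl rgnStep (s, out)).2 = out ++ rgnSpecRev acc r := by
  induction r with
  | nil => intro s acc out _ _; simp [rgnSpecRev]
  | cons x xs ih =>
      intro s acc out hperm hs
      rw [List.foldl_cons, rgnStep_out s out x hs]
      have hperm' : (s.takeWhile (fun v => decide (v ≤ x)) ++ x :: s.dropWhile (fun v => decide (v ≤ x))).Perm (x :: acc) := by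
        refine List.perm_middle.trans ?_
        rw [List.takeWhile_append_dropWhile]
        exact hperm.cons x
      rw [ih _ (x :: acc) _ hperm' (rgn_insert_sorted x s hs)]
      have hmg : rgnMinGT x s = rgnMinGT x acc := rgnMinGT_perm x hperm
      simp [rgnSpecRev, hmg]

def rgnSpec' : List Int → List Int → List Int
  | [], _ => []
  | x :: xs, acc => rgnMinGT x (xs ++ acc) :: rgnSpec' xs acc

lemma rgnSpec'_concat (xs : List Int) (y : Int) (acc : List Int) :
    rgnSpec' (xs ++ [y]) acc = rgnSpec' xs (y :: acc) ++ [rgnMinGT y acc] := by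
  induction xs generalizing acc with
  | nil => rfl
  | cons a t ih => simp [rgnSpec', ih]

lemma rgn_revSpec (m : List Int) : ∀ acc, (rgnSpecRev acc m).reverse = rgnSpec' m.reverse acc := by
  induction m with
  | nil => intro acc; rfl
  | cons a t ih =>
      intro acc
      simp only [rgnSpecRev, List.reverse_cons, ih]
      rw [← rgnSpec'_concat]

lemma rgnSpec'_nil (l : List Int) : rgnSpec' l [] = rgnSpec l := by
  induction l with
  | nil => rfl
  | cons a t ih => simp [rgnSpec', rgnSpec, ih]

lemma alt_eq_spec (nums : List Int) : replaceGreaterNumber_alt nums = rgnSpec nums := by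
  unfold replaceGreaterNumber_alt
  rw [rgn_foldB nums.reverse [] [] [] (List.Perm.refl _) (by simp)]
  simp only [List.nil_append]
  rw [rgn_revSpec, List.reverse_reverse, rgnSpec'_nil]

lemma loopA_eq (nums : List Int) : ∀ fuel idx result,
    nums.length - 1 - idx = fuel → result.length = nums.length →
    result.drop idx = List.replicate (nums.length - idx) (-1) →
    rgnLoopA nums result idx = result.take idx ++ rgnSpec (nums.drop idx) := by
  intro fuel
  induction fuel with
  | zero =>
      intro idx result hfuel hlen hdrop
      rw [rgnLoopA, dif_neg (by omega)]
      by_cases hge : nums.length ≤ idx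
      · rw [List.drop_eq_nil_of_le hge, List.take_of_length_le (by omega)]
        simp [rgnSpec]
      · have hidx : idx < nums.length := by omega
        have h2 : nums.drop (idx + 1) = [] := List.drop_eq_nil_of_le (by omega)
        rw [← List.getElem_cons_drop hidx, h2]
        have h3 : rgnSpec [nums[idx]] = [-1] := rfl
        rw [h3]
        conv_lhs => rw [← List.take_append_drop idx result, hdrop]
        congr 1
        rw [show nums.length - idx = 1 by omega]
        rfl
  | succ fuel ih =>
      intro idx result hfuel hlen hdrop
      have hidx1 : idx + 1 < nums.length := by omega
      have hidx : idx < nums.length := by omega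
      rw [rgnLoopA, dif_pos (by omega)]
      have hslice : PySem.List.slice nums (some ((idx : Int) + 1)) none = nums.drop (idx + 1) := by
        rw [show ((idx : Int) + 1) = (((idx + 1 : Nat)) : Int) by push_cast; ring,
          PySem.List.slice_from_natCast]
      have hget : PySem.List.pyGetD nums (idx : Int) 0 = nums[idx] := by
        rw [PySem.List.pyGetD_natCast]
        exact List.getD_eq_getElem nums 0 hidx
      simp only [hslice, hget, PySem.List.foldl_append_ite_eq_filter, List.nil_append,
        PySem.List.pySetD_natCast]
      have hv : (if ((nums.drop (idx + 1)).filter (fun t => decide (nums[idx] < t))).length ≠ 0 then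
          (PySem.List.min? ((nums.drop (idx + 1)).filter (fun t => decide (nums[idx] < t))) (fun y => y)).getD (-1)
          else -1) = rgnMinGT nums[idx] (nums.drop (idx + 1)) := by
        unfold rgnMinGT
        by_cases h0 : (nums.drop (idx + 1)).filter (fun t => decide (nums[idx] < t)) = []
        · rw [h0]
          simp only [List.length_nil, ne_eq, not_true_eq_false, if_false]
          rfl
        · rw [if_pos (by simpa using h0)]
          cases hm : PySem.List.min? ((nums.drop (idx + 1)).filter (fun t => decide (nums[idx] < t))) (fun y => y) with
          | none => exact absurd ((PySem.List.min?_eq_none_iff _ _).1 hm) h0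
          | some m => rfl
      rw [hv]
      have hdrop' : (result.set idx (rgnMinGT nums[idx] (nums.drop (idx + 1)))).drop (idx + 1) =
          List.replicate (nums.length - (idx + 1)) (-1) := by
        rw [List.drop_set_of_lt (by omega)]
        have h1 : result.drop (idx + 1) = (List.replicate (nums.length - idx) (-1)).drop 1 := by
          rw [← hdrop, List.drop_drop]
        rw [h1, List.drop_replicate]
        congr 1
      rw [ih (idx + 1) _ (by omega) (by simp [hlen]) hdrop']
      rw [← List.getElem_cons_drop hidx]
      have htake : (result.set idx (rgnMinGT nums[idx] (nums.drop (idx + 1)))).take (idx + 1) =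
          result.take idx ++ [rgnMinGT nums[idx] (nums.drop (idx + 1))] := by
        rw [List.take_add_one, List.take_set_of_le le_rfl,
          List.getElem?_set_self (by omega)]
        rfl
      rw [htake]
      simp [rgnSpec]

lemma a_eq_spec (nums : List Int) : replaceGreaterNumber nums = rgnSpec nums := by
  unfold replaceGreaterNumber
  rw [loopA_eq nums (nums.length - 1 - 0) 0 _ rfl (by simp) (by simp)]
  simp

-- ===== VERDICT (by name: the statement is the Claim_ definition above) =====
theorem replaceGreaterNumber_spec : Claim_equal_replaceGreaterNumber := by
  intro nums _
  unfold Spec_replaceGreaterNumber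
  rw [a_eq_spec, alt_eq_spec]
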